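-- pv_equiv track=rewrite | github.com/nfox18212/nfox18212.github.io | scripts/clz.py | clz
-- ===== SOURCE A (Python) =====
-- def clz(num) -> int:
--     # counts leading zeros of a 32 bit number
--     num32 = num & 0xFFFFFFFF # force num to be 32 bits
--     endbit = 31
--     lz = 0
--
--     for bit in range(endbit): # counts backwards
--         shift = endbit - bit # number of bits to shift
--         mask = 1 << shift
--
--         if(mask & num32 == 0): # if the and result gives a zero, increment leadzing zeros by 1
--             lz += 1
--         else:
--             break # break out of the loop if we ever encounter a 1
--     return lz
-- ===== SOURCE B (Python) =====
-- def clz(num) -> int: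
--     # closed form: leading zeros among bits 31..1 of the low 32 bits
--     num32 = num & 0xFFFFFFFF
--     return min(31, 32 - num32.bit_length())
-- ===== Notes on version B (the rewrite author's own statement) =====
-- stated objective: simpler
-- what changed: Replaced the descending per-bit scan loop with a loop-free closed form: mask to the low word and compute the clamped complement of the masked value's bit_length, which reproduces A's value everywhere (including the cap on zero, since A never examines the lowest bit).
import Mathlib
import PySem

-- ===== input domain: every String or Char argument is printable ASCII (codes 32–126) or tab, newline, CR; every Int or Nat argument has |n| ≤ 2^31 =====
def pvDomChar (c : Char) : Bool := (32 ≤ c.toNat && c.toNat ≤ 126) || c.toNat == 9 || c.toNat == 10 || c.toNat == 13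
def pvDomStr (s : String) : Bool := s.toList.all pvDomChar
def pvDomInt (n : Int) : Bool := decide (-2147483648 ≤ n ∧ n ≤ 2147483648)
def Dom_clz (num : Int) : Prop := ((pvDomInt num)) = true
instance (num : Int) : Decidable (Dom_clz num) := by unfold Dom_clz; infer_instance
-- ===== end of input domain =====

-- B replaces A's 31-iteration bit scan with a closed form from the bit length (simpler).

-- ===== PORT A =====
-- the `for bit in range(endbit)` loop with its `break`; Python `&` is Int.land (exact
-- two's-complement semantics on Int), `1 << shift` is `<<<` (shift is in 1..31 here)
def clzLoop (num32 endbit : Int) : List Int → Int → Int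
  | [], lz => lz
  | bit :: rest, lz =>
    let shift := endbit - bit
    let mask := (1 : Int) <<< shift
    if Int.land mask num32 = 0 then clzLoop num32 endbit rest (lz + 1)
    else lz

def clz (num : Int) : Int :=
  let num32 := Int.land num 0xFFFFFFFF
  let endbit : Int := 31
  clzLoop num32 endbit (PySem.List.pyRange 0 endbit 1) 0

-- ===== PORT B =====
-- `num32.bit_length()` for num32 ≥ 0 is exactly Nat.size num32.toNat
def clz_alt (num : Int) : Int :=
  let num32 := Int.land num 0xFFFFFFFF
  min 31 (32 - (Nat.size num32.toNat : Int))

-- ===== PRECONDITION & SPEC =====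
def Spec_clz (num : Int) (out : Int) : Prop := out = clz_alt num
instance (num : Int) (out : Int) : Decidable (Spec_clz num out) := by unfold Spec_clz; infer_instance

-- ===== CLAIM (what is proved, stated in full; the proofs are below) =====
def Claim_equal_clz : Prop := ∀ (num : Int), Dom_clz num → Spec_clz num (clz num)

-- ===== LEMMAS AND PROOFS =====

-- masking with 0xFFFFFFFF lands in [0, 2^32)
theorem land_mask_nonneg (num : Int) : 0 ≤ Int.land num 0xFFFFFFFF := by
  cases num with
  | ofNat n => exact Int.natCast_nonneg _
  | negSucc n => exact Int.natCast_nonneg _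

theorem ldiff_le_left (n m : Nat) : Nat.ldiff n m ≤ n := by
  apply Nat.le_of_testBit
  intro i h
  simp [Nat.testBit_ldiff] at h
  exact h.1

theorem land_mask_lt (num : Int) : Int.land num 0xFFFFFFFF < 4294967296 := by
  cases num with
  | ofNat n =>
      show ((n &&& 4294967295 : Nat) : Int) < 4294967296
      have : n &&& 4294967295 ≤ 4294967295 := Nat.and_le_right
      exact_mod_cast by omega
  | negSucc n =>
      show ((Nat.ldiff 4294967295 n : Nat) : Int) < 4294967296
      have : Nat.ldiff 4294967295 n ≤ 4294967295 := ldiff_le_left _ _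
      exact_mod_cast by omega

theorem testBit_true_of_bounds {m i : Nat} (h1 : 2^i ≤ m) (h2 : m < 2^(i+1)) :
    m.testBit i = true := by
  rw [Nat.testBit, Nat.shiftRight_eq_div_pow]
  have h3 : m / 2^i = 1 :=
    Nat.div_eq_of_lt_le (by simpa using h1)
      (by rw [pow_succ, mul_comm] at h2; simpa [two_mul] using h2)
  simp [h3]

-- characterisation of A's loop: starting at bit index b, with m < 2^(32-b),
-- it adds the number of leading-zero positions among shifts 31-b … 1
theorem clzLoop_eq (f : Nat) : ∀ (b : Nat), 31 - b = f → b ≤ 31 →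
    ∀ (m : Nat) (lz : Int), m < 2^(32 - b) →
    clzLoop (↑m) 31 (PySem.List.pyRange (↑b) 31 1) lz
      = lz + ↑((32 - b) - max (Nat.size m) 1) := by
  induction f with
  | zero =>
      intro b hf hb m lz hm
      have hb31 : b = 31 := by omega
      subst hb31
      have : PySem.List.pyRange (((31:Nat)):Int) 31 1 = [] := by decide
      rw [this]
      have hsz : Nat.size m ≤ 1 := Nat.size_le.mpr (by simpa using hm)
      simp [clzLoop]
  | succ f ih =>
      intro b hf hb m lz hm
      have hblt : b < 31 := by omega
      rw [PySem.List.pyRange_one_cons (by exact_mod_cast hblt)]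
      show clzLoop (↑m) 31 _ lz = _
      rw [clzLoop]
      have hshift : (31 : Int) - ↑b = ↑(31 - b) := by omega
      have hmask : (1 : Int) <<< ((31:Int) - ↑b) = ↑((1 : Nat) <<< (31 - b)) := by
        rw [hshift, Int.shiftLeft_natCast_right]; rfl
      set i := 31 - b with hi
      have hi1 : 1 ≤ i := by omega
      have h32b : 32 - b = i + 1 := by omega
      have hland : Int.land (↑((1:Nat) <<< i)) (↑m) = ↑(((1:Nat) <<< i) &&& m) := rfl
      have hpow : (1:Nat) <<< i = 2 ^ i := Nat.one_shiftLeft i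
      by_cases htb : m.testBit i = true
      · -- bit set: break; size m = i+1
        have hge : 2 ^ i ≤ m := Nat.ge_two_pow_of_testBit htb
        have hlt : m < 2 ^ (i+1) := by rwa [h32b] at hm
        have hsz : Nat.size m = i + 1 := by
          have h1 : Nat.size m ≤ i + 1 := Nat.size_le.mpr hlt
          have h2 : i < Nat.size m := Nat.lt_size.mpr hge
          omega
        have hc : ¬ (Int.land ((1:Int) <<< ((31:Int) - ↑b)) (↑m) = 0) := by
          rw [hmask, hland, hpow, Nat.two_pow_and, htb]
          simp
        simp only [hc, if_false]
        rw [hsz, h32b]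
        simp
      · -- bit clear: count and continue
        have htb' : m.testBit i = false := by simpa using htb
        have hlt : m < 2 ^ i := by
          by_contra hge
          exact htb (testBit_true_of_bounds (by omega) (by rwa [h32b] at hm))
        have hc : Int.land ((1:Int) <<< ((31:Int) - ↑b)) (↑m) = 0 := by
          rw [hmask, hland, hpow, Nat.two_pow_and, htb']
          simp
        simp only [hc]
        have hb1 : ((↑b : Int) + 1) = ↑(b+1) := by omega
        rw [hb1, ih (b+1) (by omega) (by omega) m (lz+1) (by
          have : 2 ^ i ≤ 2 ^ (32 - (b+1)) := Nat.pow_le_pow_right (by omega) (by omega)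
          omega)]
        have hsz : Nat.size m ≤ i := Nat.size_le.mpr hlt
        have : (32 - (b+1)) - max (Nat.size m) 1 + 1 = (32 - b) - max (Nat.size m) 1 := by
          omega
        push_cast [← this]
        ring

theorem clz_eq_alt (num : Int) : clz num = clz_alt num := by
  show clzLoop (Int.land num 0xFFFFFFFF) 31 (PySem.List.pyRange 0 31 1) 0
      = min 31 (32 - (Nat.size (Int.land num 0xFFFFFFFF).toNat : Int))
  have h0 := land_mask_nonneg num
  have h1 := land_mask_lt num
  set x := Int.land num 0xFFFFFFFF with hx
  have hxm : x = ↑x.toNat := by omega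
  have hmlt : x.toNat < 2 ^ 32 := by omega
  rw [hxm, Int.toNat_natCast]
  rw [show (PySem.List.pyRange 0 31 1) = (PySem.List.pyRange ((0:Nat):Int) 31 1) from rfl]
  rw [clzLoop_eq 31 0 rfl (by omega) x.toNat 0 (by simpa using hmlt)]
  have hsz : Nat.size x.toNat ≤ 32 := Nat.size_le.mpr hmlt
  rw [min_def]
  split_ifs with h <;> push_cast <;> omega

-- ===== VERDICT (by name: the statement is the Claim_ definition above) =====
theorem clz_spec : Claim_equal_clz := by
  intro num _
  show clz num = clz_alt num
  exact clz_eq_alt num
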